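-- pv_equiv track=rewrite | github.com/pypi-data/pypi-mirror-85 | packages/Sympathy/Sympathy-2.2.0-py3-none-any.whl/sympathy/utils/search.py | _pattern_list
-- ===== SOURCE A (Python) =====
-- _regex_escape = '()[].*\\+${}^-,*?|'
--
-- def _pattern_list(pattern):
--     patterns = []
--
--     if pattern:
--         words = pattern
--
--         if isinstance(pattern, str):
--             words = pattern.split(' ')
--         for word in [w for w in words if w]:
--             sub_patterns = []
--
--             for c in word:
--                 if c in _regex_escape:
--                     sub_patterns.append(f'\\{c}')
--                 else:
--                     sub_patterns.append(c)
--             patterns.append(''.join(sub_patterns))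
--     return patterns
-- ===== SOURCE B (Python) =====
-- _regex_escape = '()[].*\\+${}^-,*?|'
--
-- def _pattern_list(pattern):
--     if not pattern:
--         return []
--     if isinstance(pattern, str):
--         # single pass over the characters: split-on-space and escaping fused
--         res = []
--         buf = []
--         for c in pattern + ' ':
--             if c == ' ':
--                 if buf:
--                     res.append(''.join(buf))
--                     buf = []
--             elif c in _regex_escape:
--                 buf.append('\\')
--                 buf.append(c)
--             else:
--                 buf.append(c)
--         return res
--     return [''.join('\\' + c if c in _regex_escape else c for c in w)
--             for w in pattern if w]
-- ===== Notes on version B (the rewrite author's own statement) =====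
-- stated objective: alternative
-- what changed: Replaces the staged split(' ') / filter / per-word inner escape loop by one fused left-to-right scan over the characters with a current-word buffer: spaces flush the buffer (empty words never materialise) and special characters are escaped as they are read.
import Mathlib
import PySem

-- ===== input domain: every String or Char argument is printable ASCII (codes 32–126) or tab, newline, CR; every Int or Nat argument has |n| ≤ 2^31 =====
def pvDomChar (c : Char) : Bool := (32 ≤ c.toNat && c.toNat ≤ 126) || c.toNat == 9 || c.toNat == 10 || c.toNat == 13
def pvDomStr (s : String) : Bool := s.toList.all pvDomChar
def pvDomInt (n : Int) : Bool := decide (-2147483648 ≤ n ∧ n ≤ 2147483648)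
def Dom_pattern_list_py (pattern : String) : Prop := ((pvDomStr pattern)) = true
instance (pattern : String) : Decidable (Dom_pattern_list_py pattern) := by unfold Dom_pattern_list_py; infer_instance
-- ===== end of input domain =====

-- B fuses A's staged split(' ') / filter-empties / per-word escape loop into one
-- left-to-right scan over the characters with a current-word buffer (alternative; same cost).

-- ===== PORT A =====
def pvRegexEscape : List Char := "()[].*\\+${}^-,*?|".toList

def pattern_list_py (pattern : String) : List String :=
  if pattern ≠ "" then
    let words := (PySem.Str.split? pattern " ").getD []   -- sep ' ' ≠ '', so split? is some
    (words.filter (fun w => w ≠ "")).foldl (fun patterns word =>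
      let sub_patterns := word.toList.foldl (fun sub_patterns c =>
        sub_patterns ++ [if pvRegexEscape.contains c then String.ofList ['\\', c]
                         else String.ofList [c]]) []
      patterns ++ [PySem.Str.join "" sub_patterns]) []
  else []

-- ===== PORT B =====
-- the loop body of Source B's single scan: res/buf state, one character
def pvStep (st : List String × List Char) (c : Char) : List String × List Char :=
  if c = ' ' then
    if st.2 ≠ [] then (st.1 ++ [String.ofList st.2], []) else st
  else if pvRegexEscape.contains c then (st.1, st.2 ++ ['\\', c])
  else (st.1, st.2 ++ [c])

def pattern_list_py_alt (pattern : String) : List String :=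
  if pattern = "" then []
  else ((pattern.toList ++ [' ']).foldl pvStep ([], [])).1

-- ===== PRECONDITION & SPEC =====
def Spec_pattern_list_py (pattern : String) (out : List String) : Prop := out = pattern_list_py_alt pattern
instance (pattern : String) (out : List String) : Decidable (Spec_pattern_list_py pattern out) := by unfold Spec_pattern_list_py; infer_instance

-- ===== CLAIM (what is proved, stated in full; the proofs are below) =====
def Claim_equal_pattern_list_py : Prop := ∀ (pattern : String), Dom_pattern_list_py pattern → Spec_pattern_list_py pattern (pattern_list_py pattern)

-- ===== LEMMAS AND PROOFS =====

-- escaped form of one character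
def pvEsc (c : Char) : List Char := if pvRegexEscape.contains c then ['\\', c] else [c]

-- Python split(' ') on the character level, structurally
def splitSp : List Char → List (List Char)
  | [] => [[]]
  | c :: t =>
      if c = ' ' then [] :: splitSp t
      else match splitSp t with
        | [] => [[c]]
        | p :: ps => (c :: p) :: ps

def consHead (w : List Char) : List (List Char) → List (List Char)
  | [] => [w]
  | p :: ps => (w ++ p) :: ps

def pvEscStr (u : List Char) : String := String.ofList (u.flatMap pvEsc)

lemma splitSp_ne_nil (l : List Char) : splitSp l ≠ [] := by
  cases l with
  | nil => simp [splitSp]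
  | cons c t =>
      simp only [splitSp]
      split_ifs
      · simp
      · cases h : splitSp t <;> simp

lemma pvEsc_ne_nil (c : Char) : pvEsc c ≠ [] := by
  unfold pvEsc; split_ifs <;> simp

lemma flatMap_pvEsc_ne_nil (w : List Char) (hw : w ≠ []) : w.flatMap pvEsc ≠ [] := by
  cases w with
  | nil => exact absurd rfl hw
  | cons c t => simp [List.flatMap_cons, pvEsc_ne_nil]

lemma pvStep_space (st : List String × List Char) :
    pvStep st ' ' = if st.2 ≠ [] then (st.1 ++ [String.ofList st.2], []) else st := by
  simp [pvStep]

lemma pvStep_nonspace (st : List String × List Char) (c : Char) (hc : c ≠ ' ') :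
    pvStep st c = (st.1, st.2 ++ pvEsc c) := by
  simp only [pvStep, pvEsc, if_neg hc]
  split_ifs <;> rfl

-- the scan invariant: buffer holds the escaped current word, result holds the finished words
lemma scan_eq (l : List Char) : ∀ (acc : List String) (w : List Char),
    ((l ++ [' ']).foldl pvStep (acc, w.flatMap pvEsc)).1
      = acc ++ ((consHead w (splitSp l)).filter (fun u => u ≠ [])).map pvEscStr := by
  induction l with
  | nil =>
      intro acc w
      by_cases hw : w = []
      · subst hw; simp [pvStep_space, splitSp, consHead]
      · have hne := flatMap_pvEsc_ne_nil w hw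
        simp only [List.nil_append, List.foldl_cons, List.foldl_nil, pvStep_space, if_pos hne]
        simp [splitSp, consHead, hw, pvEscStr]
  | cons c t ih =>
      intro acc w
      by_cases hc : c = ' '
      · subst hc
        rw [List.cons_append, List.foldl_cons]
        by_cases hw : w = []
        · subst hw
          have h1 : pvStep (acc, ([] : List Char).flatMap pvEsc) ' ' = (acc, ([] : List Char).flatMap pvEsc) := by
            simp [pvStep_space]
          rw [h1, ih acc []]
          cases h : splitSp t with
          | nil => exact absurd h (splitSp_ne_nil t)
          | cons p ps => simp [splitSp, consHead, h]
        · have hne := flatMap_pvEsc_ne_nil w hw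
          have h1 : pvStep (acc, w.flatMap pvEsc) ' '
              = (acc ++ [String.ofList (w.flatMap pvEsc)], ([] : List Char).flatMap pvEsc) := by
            simp [pvStep_space, hne]
          rw [h1, ih (acc ++ [String.ofList (w.flatMap pvEsc)]) []]
          cases h : splitSp t with
          | nil => exact absurd h (splitSp_ne_nil t)
          | cons p ps => simp [splitSp, consHead, h, hw, pvEscStr]
      · rw [List.cons_append, List.foldl_cons, pvStep_nonspace _ c hc]
        have hfl : ((acc, w.flatMap pvEsc ++ pvEsc c) : List String × List Char)
            = (acc, (w ++ [c]).flatMap pvEsc) := by simp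
        rw [hfl, ih acc (w ++ [c])]
        cases h : splitSp t with
        | nil => exact absurd h (splitSp_ne_nil t)
        | cons p ps =>
            simp only [splitSp, if_neg hc, h, consHead]
            simp

-- splitOn with sep ' ' computes splitSp
lemma go_space (fuel : Nat) : ∀ (l cur : List Char) (acc : List (List Char)),
    l.length ≤ fuel →
    PySem.Chars.splitOn.go [' '] fuel l cur acc
      = acc.reverse ++ consHead cur.reverse (splitSp l) := by
  induction fuel with
  | zero =>
      intro l cur acc h
      have : l = [] := by cases l <;> simp_all
      subst this
      simp [PySem.Chars.splitOn.go, splitSp, consHead]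
  | succ f ih =>
      intro l cur acc h
      cases l with
      | nil => simp [PySem.Chars.splitOn.go, splitSp, consHead]
      | cons c rest =>
          by_cases hc : c = ' '
          · subst hc
            have hpre : [' '].isPrefixOf (' ' :: rest) = true := by simp [List.isPrefixOf]
            rw [show PySem.Chars.splitOn.go [' '] (f+1) (' ' :: rest) cur acc
                  = PySem.Chars.splitOn.go [' '] f (List.drop 1 (' ' :: rest)) [] (cur.reverse :: acc) by
                simp [PySem.Chars.splitOn.go, hpre]]
            simp only [List.drop_succ_cons, List.drop_zero]
            rw [ih rest [] (cur.reverse :: acc) (by simpa using Nat.le_of_succ_le_succ h)]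
            cases hs : splitSp rest with
            | nil => exact absurd hs (splitSp_ne_nil rest)
            | cons p ps => simp [splitSp, consHead, hs]
          · have hpre : [' '].isPrefixOf (c :: rest) = false := by
              simp [List.isPrefixOf, Ne.symm hc]
            rw [show PySem.Chars.splitOn.go [' '] (f+1) (c :: rest) cur acc
                  = PySem.Chars.splitOn.go [' '] f rest (c :: cur) acc by
                simp [PySem.Chars.splitOn.go, hpre]]
            rw [ih rest (c :: cur) acc (by simpa using Nat.le_of_succ_le_succ h)]
            cases hs : splitSp rest with
            | nil => exact absurd hs (splitSp_ne_nil rest)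
            | cons p ps => simp [splitSp, consHead, hs, hc]

lemma splitOn_space (l : List Char) :
    PySem.Chars.splitOn l [' '] = splitSp l := by
  unfold PySem.Chars.splitOn
  rw [go_space (l.length + 1) l [] [] (Nat.le_succ _)]
  cases hs : splitSp l with
  | nil => exact absurd hs (splitSp_ne_nil l)
  | cons p ps => simp [consHead]

-- A's inner loop builds the escaped word (via join "")
lemma join_empty_flatten (l : List (List Char)) : PySem.Chars.join [] l = l.flatten := by
  induction l with
  | nil => simp [PySem.Chars.join_nil]
  | cons p rest ih =>
      cases rest with
      | nil => simp [PySem.Chars.join_singleton]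
      | cons q t =>
          rw [PySem.Chars.join_cons_cons]
          simp only [List.flatten_cons]
          rw [ih]
          simp

lemma flatten_esc (cs : List Char) :
    ((cs.flatMap (fun c => [if pvRegexEscape.contains c then String.ofList ['\\', c]
                            else String.ofList [c]])).map String.toList).flatten
      = cs.flatMap pvEsc := by
  induction cs with
  | nil => simp
  | cons c t ih =>
      by_cases hm : c ∈ pvRegexEscape
      · simp [List.flatMap_cons, pvEsc, hm]
        simpa using ih
      · simp [List.flatMap_cons, pvEsc, hm]
        simpa using ih

lemma inner_eq (cs : List Char) :
    PySem.Str.join "" (cs.foldl (fun sub_patterns c =>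
      sub_patterns ++ [if pvRegexEscape.contains c then String.ofList ['\\', c]
                       else String.ofList [c]]) []) = pvEscStr cs := by
  rw [PySem.List.foldl_append_eq_flatMap]
  apply String.toList_inj.mp
  rw [PySem.Str.toList_join, show ("" : String).toList = [] from rfl, join_empty_flatten]
  simp only [pvEscStr, String.toList_ofList, List.nil_append]
  exact flatten_esc cs

-- A's whole computation, characterised through splitSp
lemma a_eq (pattern : String) (h : pattern ≠ "") :
    pattern_list_py pattern
      = ((splitSp pattern.toList).filter (fun u => u ≠ [])).map pvEscStr := by
  unfold pattern_list_py
  rw [if_pos h]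
  have hwords : (PySem.Str.split? pattern " ").getD []
      = (splitSp pattern.toList).map String.ofList := by
    simp [PySem.Str.split?, PySem.Chars.split?, splitOn_space,
      show (" " : String).toList = [' '] from rfl]
  rw [PySem.List.foldl_append_eq_flatMap, hwords, List.nil_append,
    List.filter_map, List.flatMap_map]
  have hfilt : (splitSp pattern.toList).filter ((fun w => decide ¬ w = "") ∘ String.ofList)
      = (splitSp pattern.toList).filter (fun u => u ≠ []) := by
    apply List.filter_congr
    intro u _
    simp [Function.comp]
  rw [hfilt]
  rw [show ((splitSp pattern.toList).filter (fun u => u ≠ [])).map pvEscStr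
        = ((splitSp pattern.toList).filter (fun u => u ≠ [])).flatMap (fun u => [pvEscStr u]) by
      rw [List.map_eq_flatMap]]
  apply List.flatMap_congr
  intro u _
  simp only [String.toList_ofList]
  rw [inner_eq]

-- ===== VERDICT (by name: the statement is the Claim_ definition above) =====
theorem pattern_list_py_spec : Claim_equal_pattern_list_py := by
  intro pattern _
  unfold Spec_pattern_list_py pattern_list_py_alt
  by_cases h : pattern = ""
  · simp [h, pattern_list_py]
  · rw [if_neg h, a_eq pattern h]
    have hscan := scan_eq pattern.toList [] []
    simp only [List.flatMap_nil, List.nil_append] at hscan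
    rw [hscan]
    cases hs : splitSp pattern.toList with
    | nil => exact absurd hs (splitSp_ne_nil pattern.toList)
    | cons p ps => simp [consHead]
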